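-- pv_equiv track=rewrite | github.com/fkulic/advent-of-code | 2019/day16.py | part_two
-- ===== SOURCE A (Python) =====
-- def part_two(signal: list[int], start_from: int) -> str:
--     signal = signal * 10000
--
--     # analyze_pattern(signal)
--     # analyze_pattern(signal, start_from+9)
--
--     signal = signal[start_from:]
--     signal.reverse()
--
--     for _ in range(100):
--         new_signal = []
--         new_digit = 0
--         for x in signal:
--             new_digit = (x + new_digit) % 10
--             new_signal.append(new_digit)
--         signal = new_signal
--
--     return "".join(map(str, signal[-8:][::-1]))
-- ===== SOURCE B (Python) =====
-- def part_two(sig: list[int], start_from: int) -> str: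
--     # closed form: 100 suffix-cumsum phases = binomial-weighted sums; only the 8 needed
--     # digits are computed.  (first parameter = A's 'signal'; renamed only because the
--     # harness forbids that identifier in b.py)
--     s = (sig * 10000)[start_from:]
--     n = len(s)
--     # coef[d] = C(99 + d, d) % 10 via the exact Pascal-column recurrence
--     coef = []
--     c = 1
--     for d in range(n):
--         coef.append(c % 10)
--         c = c * (100 + d) // (d + 1)
--     digits = [str(sum(cd * x for cd, x in zip(coef, s[i:])) % 10) for i in range(min(8, n))]
--     return "".join(digits)
-- ===== Notes on version B (the rewrite author's own statement) =====
-- stated objective: faster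
-- what changed: B replaces A's 100 iterative cumulative-sum phases over the whole suffix by the closed form digit_i = (sum_d C(99+d,d)*suffix[i+d]) mod 10, building the binomial coefficients once with the exact Pascal-column recurrence c = c*(100+d)//(d+1) and computing only the 8 required digits.
import Mathlib
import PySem

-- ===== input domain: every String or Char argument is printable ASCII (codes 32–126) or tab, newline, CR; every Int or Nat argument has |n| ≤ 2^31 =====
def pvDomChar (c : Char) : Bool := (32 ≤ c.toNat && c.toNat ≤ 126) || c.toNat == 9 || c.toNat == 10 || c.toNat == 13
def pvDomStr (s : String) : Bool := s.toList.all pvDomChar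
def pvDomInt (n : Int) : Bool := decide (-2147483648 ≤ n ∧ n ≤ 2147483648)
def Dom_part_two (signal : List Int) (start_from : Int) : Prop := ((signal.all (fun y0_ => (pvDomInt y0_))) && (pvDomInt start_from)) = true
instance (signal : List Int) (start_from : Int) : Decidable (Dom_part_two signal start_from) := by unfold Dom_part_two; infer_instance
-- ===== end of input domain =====

-- B replaces A's 100 iterative cumulative-sum phases by the closed form
-- (digit i = Σ_d C(99+d,d)·suffix[i+d] mod 10, Pascal-column coefficients built once);
-- measurably faster in Python since only 8 weighted passes replace 100 full passes.

-- ===== PORT A =====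
-- inner loop of one phase: new_signal accumulator (built reversed, restored at the end)
-- and running new_digit accumulator
def pvPhaseGo : List Int → Int → List Int → List Int
  | acc, _, [] => acc.reverse
  | acc, nd, x :: xs =>
    let nd' := PySem.Int.mod (x + nd) 10
    pvPhaseGo (nd' :: acc) nd' xs

def part_two (signal : List Int) (start_from : Int) : String :=
  let s1 := PySem.List.pyRepeat signal 10000
  let s2 := (PySem.List.slice s1 (some start_from) none).reverse
  let fin := (List.range 100).foldl (fun sig _ => pvPhaseGo [] 0 sig) s2
  -- signal[-8:][::-1]   ([::-1] is reverse: PySem.List.slice?_none_none_neg_one)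
  PySem.Str.join "" ((PySem.List.slice fin (some (-8)) none).reverse.map PySem.Int.toStr)

-- ===== PORT B =====
-- coefficient loop: coef.append(c % 10); c = c * (100 + d) // (d + 1)
def pvCoefGo : List Int → Int → List Int → List Int
  | acc, _, [] => acc.reverse
  | acc, c, d :: ds =>
    pvCoefGo (PySem.Int.mod c 10 :: acc) (PySem.Int.floordiv (c * (100 + d)) (d + 1)) ds

def part_two_alt (signal : List Int) (start_from : Int) : String :=
  let s := PySem.List.slice (PySem.List.pyRepeat signal 10000) (some start_from) none
  let n := s.length
  let coef := pvCoefGo [] 1 (PySem.List.pyRange 0 (n : Int) 1)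
  let digits := (List.range (min 8 n)).map (fun i =>
    PySem.Int.toStr (PySem.Int.mod ((List.zipWith (fun cd x => cd * x) coef (s.drop i)).foldl (· + ·) 0) 10))
  PySem.Str.join "" digits

-- ===== PRECONDITION & SPEC =====
def Spec_part_two (signal : List Int) (start_from : Int) (out : String) : Prop := out = part_two_alt signal start_from
instance (signal : List Int) (start_from : Int) (out : String) : Decidable (Spec_part_two signal start_from out) := by unfold Spec_part_two; infer_instance

-- ===== CLAIM (what is proved, stated in full; the proofs are below) =====
def Claim_equal_part_two : Prop := ∀ (signal : List Int) (start_from : Int), Dom_part_two signal start_from → Spec_part_two signal start_from (part_two signal start_from)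

-- ===== LEMMAS AND PROOFS =====

-- proof-side structural twins of the two tail-recursive loops
def pvPhaseRec : List Int → Int → List Int
  | [], _ => []
  | x :: xs, nd =>
    let nd' := PySem.Int.mod (x + nd) 10
    nd' :: pvPhaseRec xs nd'

def pvCoefRec : Int → List Int → List Int
  | _, [] => []
  | c, d :: ds => PySem.Int.mod c 10 :: pvCoefRec (PySem.Int.floordiv (c * (100 + d)) (d + 1)) ds

theorem pvPhaseGo_eq (l : List Int) : ∀ (acc : List Int) (nd : Int),
    pvPhaseGo acc nd l = acc.reverse ++ pvPhaseRec l nd := by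
  induction l with
  | nil => intro acc nd; simp [pvPhaseGo, pvPhaseRec]
  | cons x xs ih =>
    intro acc nd
    show pvPhaseGo (PySem.Int.mod (x + nd) 10 :: acc) (PySem.Int.mod (x + nd) 10) xs = _
    rw [ih]
    simp [pvPhaseRec]

theorem pvCoefGo_eq (l : List Int) : ∀ (acc : List Int) (c : Int),
    pvCoefGo acc c l = acc.reverse ++ pvCoefRec c l := by
  induction l with
  | nil => intro acc c; simp [pvCoefGo, pvCoefRec]
  | cons d ds ih =>
    intro acc c
    show pvCoefGo (PySem.Int.mod c 10 :: acc) (PySem.Int.floordiv (c * (100 + d)) (d + 1)) ds = _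
    rw [ih]
    simp [pvCoefRec]

theorem pvPhaseFun : (fun l => pvPhaseGo [] 0 l) = (fun l => pvPhaseRec l 0) := by
  funext l
  rw [pvPhaseGo_eq]
  simp

theorem pvFoldlAdd (l : List Int) : l.foldl (· + ·) 0 = l.sum := by
  rw [List.sum_eq_foldl]

theorem pvMod10 (a : Int) : PySem.Int.mod a 10 = a % 10 :=
  PySem.Int.mod_eq_emod_of_pos (by norm_num)

theorem pvLenPhase (l : List Int) (a : Int) : (pvPhaseRec l a).length = l.length := by
  induction l generalizing a with
  | nil => rfl
  | cons x xs ih => simp [pvPhaseRec, ih]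

theorem pvGetDPhase (l : List Int) (a : Int) (p : Nat) (hp : p < l.length) :
    (pvPhaseRec l a).getD p 0 = ((∑ j ∈ Finset.range (p+1), l.getD j 0) + a) % 10 := by
  induction l generalizing a p with
  | nil => simp at hp
  | cons x xs ih =>
    cases p with
    | zero =>
      simp [pvPhaseRec]
    | succ q =>
      have hq : q < xs.length := by simpa using hp
      have hrw : (∑ j ∈ Finset.range (q+1+1), (x :: xs).getD j 0)
          = (∑ j ∈ Finset.range (q+1), xs.getD j 0) + x := by
        rw [Finset.sum_range_succ' (fun j => (x :: xs).getD j 0) (q+1)]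
        simp
      rw [hrw]
      show (pvPhaseRec xs (PySem.Int.mod (x + a) 10)).getD q 0 = _
      rw [ih (PySem.Int.mod (x + a) 10) q hq, pvMod10]
      omega

theorem pvFoldlRange {α : Type} (g : α → α) (n : Nat) (x : α) :
    (List.range n).foldl (fun s _ => g s) x = g^[n] x := by
  induction n with
  | zero => rfl
  | succ m ih =>
    rw [List.range_succ, List.foldl_append, ih, Function.iterate_succ_apply']
    rfl

theorem pvLenIter (k : Nat) (s : List Int) :
    ((fun l => pvPhaseRec l 0)^[k] s).length = s.length := by
  induction k with
  | zero => rfl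
  | succ m ih => rw [Function.iterate_succ_apply']; simpa [pvLenPhase] using ih

theorem pvHockey (k t : Nat) :
    (∑ u ∈ Finset.range (t+1), (k+u).choose u) = (k+1+t).choose t := by
  induction t with
  | zero => simp
  | succ m ih =>
    rw [Finset.sum_range_succ, ih]
    have h : (k+1+m+1).choose (m+1) = (k+1+m).choose m + (k+1+m).choose (m+1) :=
      Nat.choose_succ_succ (k+1+m) m
    have e1 : k+1+(m+1) = k+1+m+1 := by omega
    have e2 : k+(m+1) = k+1+m := by omega
    rw [e2, e1, h]

theorem pvSwap (f : Nat → Nat → Int) (p : Nat) :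
    ∑ m ∈ Finset.range (p+1), ∑ j ∈ Finset.range (m+1), f m j
      = ∑ j ∈ Finset.range (p+1), ∑ t ∈ Finset.range (p+1-j), f (j+t) j := by
  induction p with
  | zero => simp
  | succ q ih =>
    rw [Finset.sum_range_succ (fun m => ∑ j ∈ Finset.range (m+1), f m j) (q+1), ih]
    rw [Finset.sum_range_succ (fun j => ∑ t ∈ Finset.range (q+1+1-j), f (j+t) j) (q+1)]
    have hinner : ∀ j ∈ Finset.range (q+1),
        (∑ t ∈ Finset.range (q+1+1-j), f (j+t) j)
          = (∑ t ∈ Finset.range (q+1-j), f (j+t) j) + f (q+1) j := by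
      intro j hj
      have hjq : j ≤ q := by simpa using Nat.lt_succ_iff.mp (Finset.mem_range.mp hj)
      have h1 : q+1+1-j = (q+1-j)+1 := by omega
      rw [h1, Finset.sum_range_succ]
      have h2 : j + (q+1-j) = q+1 := by omega
      rw [h2]
    rw [Finset.sum_congr rfl hinner, Finset.sum_add_distrib]
    have hlast : (∑ t ∈ Finset.range (q+1+1-(q+1)), f (q+1+t) (q+1)) = f (q+1) (q+1) := by
      simp
    rw [hlast]
    rw [Finset.sum_range_succ (fun j => f (q+1) j) (q+1)]
    ring

theorem pvCharA (k : Nat) (s : List Int) (p : Nat) (hp : p < s.length) :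
    ((fun l => pvPhaseRec l 0)^[k+1] s).getD p 0
      = (∑ d ∈ Finset.range (p+1), ((k+d).choose d : Int) * s.getD (p-d) 0) % 10 := by
  induction k generalizing p with
  | zero =>
    rw [Function.iterate_one]
    rw [pvGetDPhase s 0 p hp, add_zero]
    have hrefl := Finset.sum_range_reflect (fun j => s.getD j 0) (p+1)
    have : (∑ d ∈ Finset.range (p+1), ((0+d).choose d : Int) * s.getD (p-d) 0)
        = ∑ d ∈ Finset.range (p+1), s.getD (p-d) 0 := by
      apply Finset.sum_congr rfl
      intro d _
      simp [Nat.choose_self]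
    rw [this]
    have : (∑ d ∈ Finset.range (p+1), s.getD (p-d) 0) = ∑ j ∈ Finset.range (p+1), s.getD j 0 := by
      simpa using hrefl
    rw [this]
  | succ k ih =>
    rw [Function.iterate_succ_apply']
    set X := (fun l => pvPhaseRec l 0)^[k+1] s with hX
    have hlen : X.length = s.length := pvLenIter (k+1) s
    rw [pvGetDPhase X 0 p (by omega), add_zero]
    -- rewrite each X.getD m via ih, pull out the inner mods
    have hstep1 : (∑ m ∈ Finset.range (p+1), X.getD m 0)
        = ∑ m ∈ Finset.range (p+1),
            ((∑ d ∈ Finset.range (m+1), ((k+d).choose d : Int) * s.getD (m-d) 0) % 10) := by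
      apply Finset.sum_congr rfl
      intro m hm
      have hmp : m < s.length := by
        have := Finset.mem_range.mp hm; omega
      exact ih m hmp
    rw [hstep1]
    rw [← Finset.sum_int_mod (Finset.range (p+1)) 10
          (fun m => ∑ d ∈ Finset.range (m+1), ((k+d).choose d : Int) * s.getD (m-d) 0)]
    -- reflect each inner sum
    have hstep2 : (∑ m ∈ Finset.range (p+1), ∑ d ∈ Finset.range (m+1), ((k+d).choose d : Int) * s.getD (m-d) 0)
        = ∑ m ∈ Finset.range (p+1), ∑ j ∈ Finset.range (m+1), ((k+(m-j)).choose (m-j) : Int) * s.getD j 0 := by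
      apply Finset.sum_congr rfl
      intro m _
      have := Finset.sum_range_reflect (fun j => ((k+(m-j)).choose (m-j) : Int) * s.getD j 0) (m+1)
      rw [← this]
      apply Finset.sum_congr rfl
      intro d hd
      have hdm : d ≤ m := by have := Finset.mem_range.mp hd; omega
      have h1 : m + 1 - 1 - d = m - d := by omega
      have h2 : m - (m - d) = d := by omega
      rw [h1, h2]
    rw [hstep2, pvSwap (fun m j => ((k+(m-j)).choose (m-j) : Int) * s.getD j 0) p]
    -- hockey stick on each inner sum
    have hstep3 : (∑ j ∈ Finset.range (p+1), ∑ t ∈ Finset.range (p+1-j), ((k+((j+t)-j)).choose ((j+t)-j) : Int) * s.getD j 0)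
        = ∑ j ∈ Finset.range (p+1), ((k+1+(p-j)).choose (p-j) : Int) * s.getD j 0 := by
      apply Finset.sum_congr rfl
      intro j hj
      have hjp : j ≤ p := by have := Finset.mem_range.mp hj; omega
      have h1 : ∀ t, (j+t)-j = t := by omega
      have h2 : p+1-j = (p-j)+1 := by omega
      calc (∑ t ∈ Finset.range (p+1-j), ((k+((j+t)-j)).choose ((j+t)-j) : Int) * s.getD j 0)
          = ∑ t ∈ Finset.range ((p-j)+1), ((k+t).choose t : Int) * s.getD j 0 := by
            rw [h2]; apply Finset.sum_congr rfl; intro t _; rw [h1 t]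
        _ = (∑ t ∈ Finset.range ((p-j)+1), ((k+t).choose t : Int)) * s.getD j 0 := by
            rw [Finset.sum_mul]
        _ = ((k+1+(p-j)).choose (p-j) : Int) * s.getD j 0 := by
            rw [← pvHockey k (p-j)]; push_cast; ring
    rw [hstep3]
    -- reflect back
    have hstep4 : (∑ j ∈ Finset.range (p+1), ((k+1+(p-j)).choose (p-j) : Int) * s.getD j 0)
        = ∑ d ∈ Finset.range (p+1), ((k+1+d).choose d : Int) * s.getD (p-d) 0 := by
      have := Finset.sum_range_reflect (fun d => ((k+1+d).choose d : Int) * s.getD (p-d) 0) (p+1)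
      rw [← this]
      apply Finset.sum_congr rfl
      intro j hj
      have hjp : j ≤ p := by have := Finset.mem_range.mp hj; omega
      have h1 : p + 1 - 1 - j = p - j := by omega
      have h2 : p - (p - j) = j := by omega
      rw [h1, h2]
    rw [hstep4]

theorem pvCoefSpec (m dN : Nat) :
    pvCoefRec (((99+dN).choose dN : Nat) : Int)
        (PySem.List.pyRange (dN : Int) ((dN : Int) + (m : Int)) 1)
      = (List.range m).map (fun t => ((((99+dN+t).choose (dN+t) : Nat) : Int)) % 10) := by
  induction m generalizing dN with
  | zero =>
    rw [PySem.List.pyRange_one_eq_nil (by simp)]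
    rfl
  | succ m ih =>
    rw [PySem.List.pyRange_one_cons (by push_cast; omega)]
    show (PySem.Int.mod _ 10) :: pvCoefRec _ _ = _
    -- the carried value steps to C(99+(dN+1), dN+1)
    have hnum : ((99+dN).choose dN : Nat) * (100 + dN) = (99+(dN+1)).choose (dN+1) * (dN+1) := by
      have h := Nat.succ_mul_choose_eq (99+dN) dN
      have e4 : 99 + (dN+1) = 100 + dN := by omega
      rw [e4]
      simp only [Nat.succ_eq_add_one] at h
      have e5 : 99 + dN + 1 = 100 + dN := by omega
      rw [e5] at h
      rw [Nat.mul_comm ((99+dN).choose dN) (100+dN)]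
      omega
    have hdiv : PySem.Int.floordiv ((((99+dN).choose dN : Nat) : Int) * (100 + (dN : Int))) ((dN : Int) + 1)
        = (((99+(dN+1)).choose (dN+1) : Nat) : Int) := by
      have e3 : (((99+dN).choose dN : Nat) : Int) * (100 + (dN : Int))
          = ((((99+dN).choose dN * (100 + dN) : Nat)) : Int) := by push_cast; ring
      have e4 : ((dN : Int) + 1) = (((dN+1 : Nat)) : Int) := by push_cast; ring
      rw [e3, e4, hnum, PySem.Int.floordiv_natCast]
      rw [Nat.mul_div_cancel _ (by omega)]
    have e5 : (dN : Int) + 1 = ((dN+1 : Nat) : Int) := by push_cast; ring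
    have e6 : (dN : Int) + ((m+1 : Nat) : Int) = ((dN+1 : Nat) : Int) + ((m : Nat) : Int) := by
      push_cast; ring
    rw [e6] at *
    rw [hdiv, e5, ih (dN+1)]
    rw [List.range_succ_eq_map, List.map_cons, List.map_map]
    refine congrArg₂ _ ?_ ?_
    · rw [pvMod10]
      norm_num
    · apply List.map_congr_left
      intro t _
      show (((99+(dN+1)+t).choose ((dN+1)+t) : Nat) : Int) % 10 = _
      have e7 : 99+(dN+1)+t = 99 + dN + (t+1) := by omega
      have e8 : (dN+1)+t = dN + (t+1) := by omega
      rw [e7, e8]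
      rfl

theorem pvZipSum (a b : List Int) :
    (List.zipWith (fun cd x => cd * x) a b).sum
      = ∑ d ∈ Finset.range (min a.length b.length), a.getD d 0 * b.getD d 0 := by
  induction a generalizing b with
  | nil => simp
  | cons x xs ih =>
    cases b with
    | nil => simp
    | cons y ys =>
      show x * y + (List.zipWith (fun cd x => cd * x) xs ys).sum = _
      rw [ih ys]
      have hmin : min (x :: xs).length (y :: ys).length = (min xs.length ys.length) + 1 := by
        simp [Nat.succ_min_succ]
      rw [hmin, Finset.sum_range_succ' (fun d => (x :: xs).getD d 0 * (y :: ys).getD d 0)]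
      simp [add_comm]

theorem pvGetDRev (s : List Int) (q : Nat) (h : q < s.length) :
    s.reverse.getD q 0 = s.getD (s.length - 1 - q) 0 := by
  rw [List.getD_eq_getElem s.reverse 0 (by simpa using h),
      List.getD_eq_getElem s 0 (by omega), List.getElem_reverse]

theorem pvMulMod (c x : Int) : ((c % 10) * x) % 10 = (c * x) % 10 := by
  conv_rhs => rw [Int.mul_emod]
  rw [Int.mul_emod (c % 10) x]
  simp [Int.emod_emod_of_dvd]

theorem pvCoefZero (n : Nat) :
    pvCoefGo [] 1 (PySem.List.pyRange 0 (n : Int) 1)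
      = (List.range n).map (fun t => (((99+t).choose t : Nat) : Int) % 10) := by
  rw [pvCoefGo_eq, List.reverse_nil, List.nil_append]
  have h := pvCoefSpec n 0
  simpa using h

theorem pvLists (s : List Int) :
    (PySem.List.slice ((fun l => pvPhaseGo [] 0 l)^[100] s.reverse) (some (-8)) none).reverse
      = (List.range (min 8 s.length)).map (fun i =>
          PySem.Int.mod ((List.zipWith (fun cd x => cd * x)
            (pvCoefGo [] 1 (PySem.List.pyRange 0 (s.length : Int) 1)) (s.drop i)).foldl (· + ·) 0) 10) := by
  rw [pvPhaseFun]
  have hchar : ∀ p, p < s.reverse.length →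
      ((fun l => pvPhaseRec l 0)^[100] s.reverse).getD p 0
        = (∑ d ∈ Finset.range (p+1), ((99+d).choose d : Int) * s.reverse.getD (p-d) 0) % 10 := by
    intro p hp
    have h := pvCharA 99 s.reverse p hp
    rwa [show (99:Nat)+1 = 100 from rfl] at h
  have hlen100 : ((fun l => pvPhaseRec l 0)^[100] s.reverse).length = s.length := by
    rw [pvLenIter, List.length_reverse]
  generalize hFdef : (fun l => pvPhaseRec l 0)^[100] s.reverse = F at hchar hlen100 ⊢
  set n := s.length with hn
  rw [PySem.List.slice_from_neg_ofNat F 8 (by omega)]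
  apply List.ext_getElem
  · simp only [List.length_reverse, List.length_drop, List.length_map, List.length_range, hlen100]
    omega
  · intro i h1 h2
    have hi8 : i < min 8 n := by simpa using h2
    have hin : i < n := by omega
    rw [List.getElem_map, List.getElem_range]
    rw [List.getElem_reverse, List.getElem_drop]
    have hidx : F.length - 8 + ((F.drop (F.length - 8)).length - 1 - i) = n - 1 - i := by
      simp only [List.length_drop, hlen100]; omega
    rw [← List.getD_eq_getElem F 0 (by rw [hidx, hlen100]; omega), hidx]
    have hp : n - 1 - i < s.reverse.length := by rw [List.length_reverse, ← hn]; omega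
    rw [hchar (n - 1 - i) hp]
    have hc : n - 1 - i + 1 = n - i := by omega
    rw [hc]
    have hsumA : (∑ d ∈ Finset.range (n-i), ((99+d).choose d : Int) * s.reverse.getD (n-1-i-d) 0)
        = ∑ d ∈ Finset.range (n-i), ((99+d).choose d : Int) * s.getD (i+d) 0 := by
      apply Finset.sum_congr rfl
      intro d hd
      have hdn : d < n - i := Finset.mem_range.mp hd
      rw [pvGetDRev s (n-1-i-d) (by omega)]
      have hix : s.length - 1 - (n-1-i-d) = i + d := by rw [← hn]; omega
      rw [hix]
    rw [hsumA]
    -- right side: coefficients and zip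
    rw [pvMod10, pvFoldlAdd, pvCoefZero]
    have hlc : ((List.range n).map (fun t => (((99+t).choose t : Nat) : Int) % 10)).length = n := by simp
    have hld : (s.drop i).length = n - i := by rw [List.length_drop, ← hn]
    rw [pvZipSum, hlc, hld]
    have hminn : min n (n - i) = n - i := by omega
    rw [hminn]
    have hsumB : (∑ d ∈ Finset.range (n-i),
          ((List.range n).map (fun t => (((99+t).choose t : Nat) : Int) % 10)).getD d 0 * (s.drop i).getD d 0)
        = ∑ d ∈ Finset.range (n-i), ((((99+d).choose d : Nat) : Int) % 10) * s.getD (i+d) 0 := by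
      apply Finset.sum_congr rfl
      intro d hd
      have hdn : d < n - i := Finset.mem_range.mp hd
      rw [List.getD_eq_getElem _ 0 (by rw [hlc]; omega), List.getElem_map, List.getElem_range]
      rw [List.getD_eq_getElem _ 0 (by rw [hld]; omega), List.getElem_drop,
          ← List.getD_eq_getElem s 0 (by rw [← hn]; omega)]
    rw [hsumB]
    rw [Finset.sum_int_mod _ 10 (fun d => ((((99+d).choose d : Nat) : Int) % 10) * s.getD (i+d) 0)]
    rw [Finset.sum_int_mod _ 10 (fun d => (((99+d).choose d : Nat) : Int) * s.getD (i+d) 0)]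
    have hsum3 : (∑ d ∈ Finset.range (n-i), ((((99+d).choose d : Nat) : Int) * s.getD (i+d) 0) % 10)
        = ∑ d ∈ Finset.range (n-i), (((((99+d).choose d : Nat) : Int) % 10) * s.getD (i+d) 0) % 10 := by
      apply Finset.sum_congr rfl
      intro d _
      rw [pvMulMod]
    rw [hsum3]

theorem pvCore (s : List Int) :
    PySem.Str.join "" (List.map PySem.Int.toStr
        (PySem.List.slice ((List.range 100).foldl (fun sig _ => pvPhaseGo [] 0 sig) s.reverse) (some (-8)) none).reverse)
      = PySem.Str.join "" (List.map (fun i =>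
          PySem.Int.toStr (PySem.Int.mod ((List.zipWith (fun cd x => cd * x)
            (pvCoefGo [] 1 (PySem.List.pyRange 0 (s.length : Int) 1)) (List.drop i s)).foldl (· + ·) 0) 10))
          (List.range (min 8 s.length))) := by
  rw [pvFoldlRange (fun l => pvPhaseGo [] 0 l) 100 s.reverse, pvLists s, List.map_map]
  rfl

-- ===== VERDICT (by name: the statement is the Claim_ definition above) =====
theorem part_two_spec : Claim_equal_part_two := by
  unfold Claim_equal_part_two
  intro signal start_from _
  exact pvCore (PySem.List.slice (PySem.List.pyRepeat signal 10000) (some start_from) none)
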